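-- pv_equiv track=rewrite | github.com/navetech/work | quadrado-magico/utils.py | def_lines_are_valid
-- ===== SOURCE A (Python) =====
-- def def_lines_are_valid(
--         def_lines,
--         lines_len, lines_sum, max_value
--         ):
--     """
--     Check if defined lines are valid
--     """
--
--     if def_lines is None:
--         return False
--
--     num_def_lines = len(def_lines)
--
--     if num_def_lines == 0:
--         return True
--
--     num_lines = lines_len
--
--     if num_def_lines > num_lines:
--         return False
--
--     lines_diff_values = set()
--
--     for line_values in def_lines:
--         line_values_count = len(line_values)
--
--         if line_values_count > lines_len:
--             return False
--
--         line_diff_values = set(line_values)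
--
--         if len(line_diff_values) != line_values_count:
--             return False
--
--         if len(lines_diff_values.intersection(line_diff_values)) > 0:
--             return False
--
--         lines_diff_values = lines_diff_values.union(line_diff_values)
--
--         values_sum = 0
--
--         for value in line_values:
--             if (value < 1) or (value > max_value):
--                 return False
--
--             values_sum += value
--
--             if values_sum > lines_sum:
--                 return False
--
--         if line_values_count == lines_len:
--             if values_sum != lines_sum:
--                 return False
--
--     return True
-- ===== SOURCE B (Python) =====
-- def def_lines_are_valid(
--         def_lines,
--         lines_len, lines_sum, max_value
--         ):
--     """
--     Check if defined lines are valid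
--     """
--
--     if def_lines is None:
--         return False
--     if not def_lines:
--         return True
--
--     flat = [value for line in def_lines for value in line]
--
--     # Since every admissible value is >= 1, A's running prefix-sum check
--     # overflows iff the total sum of the (nonempty) line does.
--     return (
--         len(def_lines) <= lines_len
--         and len(set(flat)) == len(flat)
--         and all(1 <= value <= max_value for value in flat)
--         and all(len(line) <= lines_len for line in def_lines)
--         and all(not line or sum(line) <= lines_sum for line in def_lines)
--         and all(len(line) != lines_len or sum(line) == lines_sum
--                 for line in def_lines)
--     )
-- ===== Notes on version B (the rewrite author's own statement) =====
-- stated objective: simpler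
-- what changed: Replaces A's stateful early-return nested loop (accumulated cross-line set with intersection/union, per-line set-size test, and a running prefix-sum accumulator) by one stateless declarative conjunction of whole-structure predicates over the flattened values, using the fact that with all values >= 1 the prefix-sum overflow check is equivalent to a total-sum check.
import Mathlib
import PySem

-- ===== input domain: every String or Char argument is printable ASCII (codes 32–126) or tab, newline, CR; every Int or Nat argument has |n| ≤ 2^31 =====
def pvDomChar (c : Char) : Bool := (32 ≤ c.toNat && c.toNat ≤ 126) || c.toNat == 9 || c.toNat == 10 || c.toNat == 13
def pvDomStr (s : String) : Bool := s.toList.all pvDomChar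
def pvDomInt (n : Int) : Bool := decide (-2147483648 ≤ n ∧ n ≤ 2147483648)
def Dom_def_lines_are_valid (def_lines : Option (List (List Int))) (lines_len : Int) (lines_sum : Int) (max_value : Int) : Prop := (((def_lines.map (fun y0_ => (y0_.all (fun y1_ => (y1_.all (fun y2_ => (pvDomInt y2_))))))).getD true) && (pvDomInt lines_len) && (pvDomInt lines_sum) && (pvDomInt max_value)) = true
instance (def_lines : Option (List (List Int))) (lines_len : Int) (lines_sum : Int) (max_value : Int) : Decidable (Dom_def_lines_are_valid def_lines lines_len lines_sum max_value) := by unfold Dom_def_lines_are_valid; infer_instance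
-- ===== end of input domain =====

-- B replaces A's stateful early-return nested loop (cross-line set algebra, running prefix sum)
-- by one stateless declarative conjunction of whole-structure predicates; objective: simpler.

-- ===== PORT A =====
-- inner 'for value in line_values' loop of A: returns the final values_sum, none = early 'return False'
def dlavInnerA (lines_sum max_value : Int) : List Int → Int → Option Int
  | [], values_sum => some values_sum
  | value :: rest, values_sum =>
    if value < 1 ∨ value > max_value then none
    else
      let values_sum' := values_sum + value
      if values_sum' > lines_sum then none
      else dlavInnerA lines_sum max_value rest values_sum'

-- outer 'for line_values in def_lines' loop of A, threading lines_diff_values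
def dlavLoopA (lines_len lines_sum max_value : Int) (lines_diff_values : PySem.Set Int) :
    List (List Int) → Bool
  | [] => true
  | line_values :: rest =>
    let line_values_count : Int := line_values.length
    if line_values_count > lines_len then false
    else
      let line_diff_values : PySem.Set Int := PySem.Set.ofList line_values
      if (line_diff_values.length : Int) ≠ line_values_count then false
      else if (PySem.Set.inter lines_diff_values line_diff_values).length > 0 then false
      else
        match dlavInnerA lines_sum max_value line_values 0 with
        | none => false
        | some values_sum =>
          if line_values_count = lines_len ∧ values_sum ≠ lines_sum then false
          else dlavLoopA lines_len lines_sum max_value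
                 (PySem.Set.union lines_diff_values line_diff_values) rest

def def_lines_are_valid (def_lines : Option (List (List Int))) (lines_len : Int) (lines_sum : Int) (max_value : Int) : Bool :=
  match def_lines with
  | none => false
  | some ls =>
    let num_def_lines : Int := ls.length
    if num_def_lines = 0 then true
    else
      let num_lines := lines_len
      if num_def_lines > num_lines then false
      else dlavLoopA lines_len lines_sum max_value PySem.Set.empty ls

-- ===== PORT B =====
def def_lines_are_valid_alt (def_lines : Option (List (List Int))) (lines_len : Int) (lines_sum : Int) (max_value : Int) : Bool :=
  match def_lines with
  | none => false
  | some ls =>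
    if ls.isEmpty then true
    else
      let flat := ls.flatMap (fun line => line)
      decide ((ls.length : Int) ≤ lines_len)
      && decide ((PySem.Set.ofList flat).length = flat.length)
      && flat.all (fun value => decide (1 ≤ value ∧ value ≤ max_value))
      && ls.all (fun line => decide ((line.length : Int) ≤ lines_len))
      && ls.all (fun line => !(!line.isEmpty) || decide (line.sum ≤ lines_sum))
      && ls.all (fun line => decide ((line.length : Int) ≠ lines_len) || decide (line.sum = lines_sum))

-- ===== PRECONDITION & SPEC =====
def Spec_def_lines_are_valid (def_lines : Option (List (List Int))) (lines_len : Int) (lines_sum : Int) (max_value : Int) (out : Bool) : Prop := out = def_lines_are_valid_alt def_lines lines_len lines_sum max_value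
instance (def_lines : Option (List (List Int))) (lines_len : Int) (lines_sum : Int) (max_value : Int) (out : Bool) : Decidable (Spec_def_lines_are_valid def_lines lines_len lines_sum max_value out) := by unfold Spec_def_lines_are_valid; infer_instance

-- ===== CLAIM =====
def Claim_equal_def_lines_are_valid : Prop := ∀ (def_lines : Option (List (List Int))) (lines_len : Int) (lines_sum : Int) (max_value : Int), Dom_def_lines_are_valid def_lines lines_len lines_sum max_value → Spec_def_lines_are_valid def_lines lines_len lines_sum max_value (def_lines_are_valid def_lines lines_len lines_sum max_value)

-- ===== LEMMAS AND PROOFS =====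

-- B's per-line conjunct bundle, used to characterise A's outer loop
def dlavLineOK (lines_len lines_sum max_value : Int) (line : List Int) : Bool :=
  decide ((line.length : Int) ≤ lines_len)
  && line.all (fun value => decide (1 ≤ value ∧ value ≤ max_value))
  && (!(!line.isEmpty) || decide (line.sum ≤ lines_sum))
  && (decide ((line.length : Int) ≠ lines_len) || decide (line.sum = lines_sum))

theorem dlav_sum_nonneg (L : List Int) (h : ∀ v ∈ L, 1 ≤ v) : 0 ≤ L.sum := by
  induction L with
  | nil => simp
  | cons v rest ih =>
    have h1 := h v (by simp)
    have h2 : 0 ≤ rest.sum := ih (fun x hx => h x (by simp [hx]))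
    simp only [List.sum_cons]; omega

-- A's inner loop characterised by a total-sum condition (values ≥ 1 ⇒ prefix sums ≤ total)
theorem dlavInnerA_char (lines_sum max_value : Int) (L : List Int) (s : Int) :
    dlavInnerA lines_sum max_value L s =
      (if (∀ v ∈ L, 1 ≤ v ∧ v ≤ max_value) ∧ (L = [] ∨ s + L.sum ≤ lines_sum)
       then some (s + L.sum) else none) := by
  induction L generalizing s with
  | nil => simp [dlavInnerA]
  | cons v rest ih =>
    simp only [dlavInnerA]
    by_cases hb : v < 1 ∨ v > max_value
    · rw [if_pos hb, if_neg]
      rintro ⟨h1, _⟩; have := h1 v (by simp); omega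
    · rw [if_neg hb]
      by_cases hs : s + v > lines_sum
      · simp only [if_pos hs]
        rw [if_neg]
        rintro ⟨h1, h2⟩
        have hrest : 0 ≤ rest.sum := dlav_sum_nonneg rest (fun x hx => (h1 x (by simp [hx])).1)
        rcases h2 with h2 | h2
        · exact (List.cons_ne_nil v rest) h2
        · simp only [List.sum_cons] at h2; omega
      · simp only [if_neg hs, ih]
        by_cases hc : (∀ x ∈ rest, 1 ≤ x ∧ x ≤ max_value) ∧ (rest = [] ∨ s + v + rest.sum ≤ lines_sum)
        · rw [if_pos hc, if_pos]
          · simp only [List.sum_cons]; ring_nf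
          · refine ⟨?_, Or.inr ?_⟩
            · intro x hx
              rcases List.mem_cons.1 hx with rfl | hx
              · omega
              · exact hc.1 x hx
            · rcases hc.2 with h2 | h2
              · subst h2; simpa using (by omega : s + v ≤ lines_sum)
              · simp only [List.sum_cons]; omega
        · rw [if_neg hc, if_neg]
          rintro ⟨h1, h2⟩
          refine hc ⟨fun x hx => h1 x (by simp [hx]), ?_⟩
          rcases h2 with h2 | h2
          · exact (List.cons_ne_nil v rest) h2 |>.elim
          · simp only [List.sum_cons] at h2; exact Or.inr (by omega)

theorem dlav_ofList_length_eq_iff (L : List Int) :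
    (PySem.Set.ofList L).length = L.length ↔ L.Nodup := by
  constructor
  · intro h
    have hsub : PySem.Set.ofList L ⊆ L := by
      intro x hx; exact (PySem.Set.mem_ofList L x).1 hx
    have hperm : (PySem.Set.ofList L).Perm L :=
      ((PySem.Set.nodup_ofList L).subperm hsub).perm_of_length_le (le_of_eq h.symm)
    exact hperm.nodup_iff.1 (PySem.Set.nodup_ofList L)
  · intro h
    have hh := PySem.Set.ofList_eq_self_of_nodup L h
    rw [hh]

theorem dlav_inter_len_iff (S : PySem.Set Int) (L : List Int) :
    (PySem.Set.inter S (PySem.Set.ofList L)).length > 0 ↔ ∃ x ∈ L, x ∈ S := by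
  rw [gt_iff_lt, List.length_pos_iff_exists_mem]
  constructor
  · rintro ⟨x, hx⟩
    rw [PySem.Set.mem_inter] at hx
    exact ⟨x, (PySem.Set.mem_ofList L x).1 hx.2, hx.1⟩
  · rintro ⟨x, hxL, hxS⟩
    exact ⟨x, (PySem.Set.mem_inter S (PySem.Set.ofList L) x).2 ⟨hxS, (PySem.Set.mem_ofList L x).2 hxL⟩⟩

-- dlavLineOK line = true ↔ the three per-line conditions A's body enforces
theorem dlavLineOK_iff (lines_len lines_sum max_value : Int) (line : List Int) :
    dlavLineOK lines_len lines_sum max_value line = true ↔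
      ((line.length : Int) ≤ lines_len ∧
       ((∀ v ∈ line, 1 ≤ v ∧ v ≤ max_value) ∧ (line = [] ∨ line.sum ≤ lines_sum)) ∧
       ¬((line.length : Int) = lines_len ∧ line.sum ≠ lines_sum)) := by
  simp [dlavLineOK, List.isEmpty_iff, and_assoc, or_iff_not_imp_left]

-- Characterisation of A's outer loop
theorem dlavLoopA_char (lines_len lines_sum max_value : Int) (ls : List (List Int))
    (S : PySem.Set Int) :
    dlavLoopA lines_len lines_sum max_value S ls =
      (decide ((ls.flatMap (fun line => line)).Nodup ∧
               ∀ x ∈ ls.flatMap (fun line => line), x ∉ S) &&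
       ls.all (dlavLineOK lines_len lines_sum max_value)) := by
  induction ls generalizing S with
  | nil => simp [dlavLoopA]
  | cons L rest ih =>
    simp only [dlavLoopA, List.flatMap_cons, List.all_cons]
    by_cases hlen : (L.length : Int) > lines_len
    · rw [if_pos hlen]
      have : dlavLineOK lines_len lines_sum max_value L = false := by
        rw [Bool.eq_false_iff]
        intro h; exact absurd ((dlavLineOK_iff _ _ _ _).1 h).1 (by omega)
      rw [this, Bool.false_and, Bool.and_false]
    · rw [if_neg hlen]
      by_cases hnd : L.Nodup
      · have hset : ¬ (((PySem.Set.ofList L).length : Int) ≠ (L.length : Int)) := by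
          rw [(dlav_ofList_length_eq_iff L).2 hnd]
          exact fun h => h rfl
        rw [if_neg hset]
        by_cases hint : (PySem.Set.inter S (PySem.Set.ofList L)).length > 0
        · obtain ⟨x, hxL, hxS⟩ := (dlav_inter_len_iff S L).1 hint
          rw [if_pos hint,
            decide_eq_false (fun h => h.2 x (List.mem_append_left _ hxL) hxS),
            Bool.false_and]
        · rw [if_neg hint, dlavInnerA_char]
          have hdisj : ∀ x ∈ L, x ∉ S := fun x hxL hxS =>
            hint ((dlav_inter_len_iff S L).2 ⟨x, hxL, hxS⟩)
          by_cases hinner : (∀ v ∈ L, 1 ≤ v ∧ v ≤ max_value) ∧ (L = [] ∨ (0:Int) + L.sum ≤ lines_sum)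
          · rw [if_pos hinner]
            simp only [zero_add] at hinner ⊢
            by_cases hex : (L.length : Int) = lines_len ∧ L.sum ≠ lines_sum
            · rw [if_pos hex]
              have : dlavLineOK lines_len lines_sum max_value L = false := by
                rw [Bool.eq_false_iff]
                intro h; exact absurd hex ((dlavLineOK_iff _ _ _ _).1 h).2.2
              rw [this, Bool.false_and, Bool.and_false]
            · rw [if_neg hex, ih]
              have hok : dlavLineOK lines_len lines_sum max_value L = true :=
                (dlavLineOK_iff _ _ _ _).2 ⟨by omega, hinner, hex⟩
              rw [hok, Bool.true_and]
              congr 1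
              rw [decide_eq_decide]
              constructor
              · rintro ⟨h1, h2⟩
                have h2S : ∀ x ∈ rest.flatMap (fun line => line), x ∉ S := by
                  intro x hx hxS
                  exact h2 x hx (by rw [PySem.Set.mem_union]; exact Or.inl hxS)
                have h2L : ∀ x ∈ rest.flatMap (fun line => line), x ∉ L := by
                  intro x hx hxL
                  refine h2 x hx ?_
                  rw [PySem.Set.mem_union]
                  exact Or.inr ((PySem.Set.mem_ofList L x).2 hxL)
                refine ⟨List.nodup_append.2 ⟨hnd, h1, fun x hxL y hyF hxy => h2L y hyF (hxy ▸ hxL)⟩, ?_⟩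
                intro x hx
                rcases List.mem_append.1 hx with h | h
                · exact hdisj x h
                · exact h2S x h
              · rintro ⟨h1, h2⟩
                rw [List.nodup_append] at h1
                refine ⟨h1.2.1, ?_⟩
                intro x hx hxU
                rw [PySem.Set.mem_union, PySem.Set.mem_ofList] at hxU
                rcases hxU with h | h
                · exact h2 x (List.mem_append_right _ hx) h
                · exact h1.2.2 x h x hx rfl
          · rw [if_neg hinner]
            have : dlavLineOK lines_len lines_sum max_value L = false := by
              rw [Bool.eq_false_iff]
              intro h
              exact hinner (by
                have := ((dlavLineOK_iff _ _ _ _).1 h).2.1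
                exact ⟨this.1, by rcases this.2 with h2 | h2 <;> [exact Or.inl h2; exact Or.inr (by omega)]⟩)
            rw [this, Bool.false_and, Bool.and_false]
      · have hset : (((PySem.Set.ofList L).length : Int) ≠ (L.length : Int)) := by
          intro h
          exact hnd ((dlav_ofList_length_eq_iff L).1 (by exact_mod_cast h))
        rw [if_pos hset,
          decide_eq_false (fun h => hnd (List.nodup_append.1 h.1).1),
          Bool.false_and]

-- B's separate `all` passes regroup into the per-line bundle
theorem dlav_alt_all_regroup (lines_len lines_sum max_value : Int) (ls : List (List Int)) :
    ((ls.flatMap (fun line => line)).all (fun value => decide (1 ≤ value ∧ value ≤ max_value))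
      && ls.all (fun line => decide ((line.length : Int) ≤ lines_len))
      && ls.all (fun line => !(!line.isEmpty) || decide (line.sum ≤ lines_sum))
      && ls.all (fun line => decide ((line.length : Int) ≠ lines_len) || decide (line.sum = lines_sum)))
    = ls.all (dlavLineOK lines_len lines_sum max_value) := by
  induction ls with
  | nil => rfl
  | cons L rest ih =>
    simp only [List.flatMap_cons, List.all_append, List.all_cons, dlavLineOK, ← ih]
    cases hA : L.all (fun value => decide (1 ≤ value ∧ value ≤ max_value)) <;>
      cases hB : (decide ((L.length : Int) ≤ lines_len)) <;>
      cases hC : (!(!L.isEmpty) || decide (L.sum ≤ lines_sum)) <;>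
      cases hD : (decide ((L.length : Int) ≠ lines_len) || decide (L.sum = lines_sum)) <;>
      simp

-- ===== VERDICT =====
theorem def_lines_are_valid_spec : Claim_equal_def_lines_are_valid := by
  intro def_lines lines_len lines_sum max_value _
  unfold Spec_def_lines_are_valid def_lines_are_valid def_lines_are_valid_alt
  cases def_lines with
  | none => rfl
  | some ls =>
    simp only
    by_cases hemp : ls = []
    · subst hemp; simp
    · have h0 : ¬ ((ls.length : Int) = 0) := by simpa using hemp
      have hne : ¬ (ls.isEmpty = true) := by simpa [List.isEmpty_iff] using hemp
      rw [if_neg h0, if_neg hne]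
      by_cases hlen : (ls.length : Int) > lines_len
      · rw [if_pos hlen, decide_eq_false (by omega : ¬ ((ls.length : Int) ≤ lines_len))]
        simp
      · rw [if_neg hlen, dlavLoopA_char]
        have hmemp : ∀ x ∈ ls.flatMap (fun line => line), x ∉ (PySem.Set.empty : PySem.Set Int) := by
          intro x _ hx; simp [PySem.Set.empty] at hx
        have hdec : decide ((ls.flatMap (fun line => line)).Nodup ∧
            ∀ x ∈ ls.flatMap (fun line => line), x ∉ (PySem.Set.empty : PySem.Set Int))
            = decide ((PySem.Set.ofList (ls.flatMap (fun line => line))).length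
                = (ls.flatMap (fun line => line)).length) := by
          rw [decide_eq_decide, dlav_ofList_length_eq_iff]
          exact ⟨fun h => h.1, fun h => ⟨h, hmemp⟩⟩
        rw [hdec, decide_eq_true (by omega : (ls.length : Int) ≤ lines_len), Bool.true_and,
          ← dlav_alt_all_regroup lines_len lines_sum max_value ls]
        cases hA : decide ((PySem.Set.ofList (ls.flatMap (fun line => line))).length
            = (ls.flatMap (fun line => line)).length) <;> simp [Bool.and_assoc]
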